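-- pv_equiv track=rewrite | github.com/stephan271c/WhisperNow | src/transcribe/core/audio/audio_processor.py | combine_transcriptions
-- ===== SOURCE A (Python) =====
-- from typing import List, Optional, Tuple
--
-- def combine_transcriptions(transcriptions: List[str]) -> str:
--     """Combine multiple transcriptions into a single text.
--
--     Args:
--         transcriptions: List of transcription strings from chunks.
--
--     Returns:
--         Combined transcription text.
--     """
--     if not transcriptions:
--         return ""
--
--     # Remove empty transcriptions
--     valid_transcriptions = [t.strip() for t in transcriptions if t and t.strip()]
--
--     if not valid_transcriptions:
--         return ""
--
--     # Combine with space separation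
--     combined = ""
--     for i, transcription in enumerate(valid_transcriptions):
--         if i > 0:
--             # Add space between chunks
--             if not combined.endswith(" ") and not transcription.startswith(" "):
--                 combined += " "
--
--         combined += transcription
--
--     # Clean up double spaces
--     while "  " in combined:
--         combined = combined.replace("  ", " ")
--
--     return combined.strip()
-- ===== SOURCE B (Python) =====
-- from typing import List
--
--
-- def combine_transcriptions(transcriptions: List[str]) -> str:
--     """Combine multiple transcriptions into a single text (single-pass version)."""
--     valid = [t.strip() for t in transcriptions if t and t.strip()]
--     if not valid:
--         return ""
--
--     joined = " ".join(valid)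
--
--     # Collapse runs of spaces in one left-to-right pass.
--     out = []
--     prev = None
--     for ch in joined:
--         if not (ch == " " and prev == " "):
--             out.append(ch)
--         prev = ch
--
--     return "".join(out).strip()
-- ===== Notes on version B (the rewrite author's own statement) =====
-- stated objective: simpler
-- what changed: The conditional endswith/startswith accumulation loop becomes a plain ' '.join of the pre-stripped pieces, and the repeated whole-string rescan (while ' ' in s: s = s.replace(' ', ' ')) becomes one left-to-right pass that drops a space whenever the previous character was a space.
import Mathlib
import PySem

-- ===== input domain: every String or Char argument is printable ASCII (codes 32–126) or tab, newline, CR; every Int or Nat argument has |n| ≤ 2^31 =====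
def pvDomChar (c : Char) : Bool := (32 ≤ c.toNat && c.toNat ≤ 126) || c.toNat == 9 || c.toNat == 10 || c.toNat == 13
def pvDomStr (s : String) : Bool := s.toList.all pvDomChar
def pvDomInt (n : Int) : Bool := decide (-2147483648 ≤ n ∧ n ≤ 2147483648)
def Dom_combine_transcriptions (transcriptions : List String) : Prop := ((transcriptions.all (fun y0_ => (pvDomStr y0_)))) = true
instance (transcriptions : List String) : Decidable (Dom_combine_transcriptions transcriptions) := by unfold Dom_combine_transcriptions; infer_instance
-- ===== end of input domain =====

-- B replaces A's conditional accumulation loop by a plain join of the stripped pieces and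
-- A's repeated whole-string while-replace by one left-to-right space-collapsing pass (simpler).

-- ===== PORT A =====
-- helpers needed only so that A's `while "  " in combined` loop can be defined (termination):
-- pvRc is exactly what one `combined.replace("  ", " ")` computes, pvHasDD exactly `"  " in combined`.
def pvRc : List Char → List Char
  | [] => []
  | [c] => [c]
  | c :: d :: t => if c = ' ' ∧ d = ' ' then ' ' :: pvRc t else c :: pvRc (d :: t)

def pvHasDD : List Char → Bool
  | c :: d :: t => (decide (c = ' ' ∧ d = ' ')) || pvHasDD (d :: t)
  | _ => false

theorem pvRc_le (s : List Char) : (pvRc s).length ≤ s.length := by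
  fun_induction pvRc s <;> (simp_all; try omega)

theorem pvReplace_go_eq (fuel : Nat) : ∀ (l acc : List Char), l.length ≤ fuel →
    PySem.Chars.replace.go [' ', ' '] [' '] fuel l acc = acc.reverse ++ pvRc l := by
  induction fuel with
  | zero =>
    intro l acc h
    have : l = [] := by cases l <;> simp_all
    subst this; simp [PySem.Chars.replace.go, pvRc]
  | succ n ih =>
    intro l acc h
    match l with
    | [] => simp [PySem.Chars.replace.go, pvRc]
    | [c] =>
      have hpre : [' ', ' '].isPrefixOf [c] = false := by
        simp [List.isPrefixOf]
      simp [PySem.Chars.replace.go, hpre]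
      rw [ih [] (c :: acc) (by simp)]
      simp [pvRc]
    | c :: d :: t =>
      by_cases hc : c = ' ' ∧ d = ' '
      · obtain ⟨hc1, hc2⟩ := hc
        subst hc1; subst hc2
        have hpre : [' ', ' '].isPrefixOf (' ' :: ' ' :: t) = true := by
          simp [List.isPrefixOf]
        simp only [PySem.Chars.replace.go, hpre, if_true]
        rw [show List.drop [' ',' '].length (' ' :: ' ' :: t) = t by simp]
        rw [ih t ([' '].reverse ++ acc) (by simp at h ⊢; omega)]
        simp [pvRc]
      · have hpre : [' ', ' '].isPrefixOf (c :: d :: t) = false := by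
          simp [List.isPrefixOf]
          intro h1 h2; exact hc ⟨h1.symm, h2.symm⟩
        simp only [PySem.Chars.replace.go, hpre]
        rw [if_neg (by simp)]
        rw [ih (d :: t) (c :: acc) (by simp at h ⊢; omega)]
        simp [pvRc, hc]

theorem pvReplace_eq (s : List Char) :
    PySem.Chars.replace s [' ', ' '] [' '] = pvRc s := by
  have h0 : PySem.Chars.replace s [' ', ' '] [' ']
      = PySem.Chars.replace.go [' ', ' '] [' '] s.length s [] := by
    simp [PySem.Chars.replace]
  rw [h0]
  exact pvReplace_go_eq s.length s [] (le_refl _)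

theorem pvIsIn_eq (s : List Char) : PySem.Chars.isIn [' ', ' '] s = pvHasDD s := by
  induction s with
  | nil => simp [pvHasDD, PySem.Chars.isIn_eq_false_iff]
  | cons c t ih =>
    rcases t with _ | ⟨d, t'⟩
    · rw [show pvHasDD [c] = false from rfl]
      rw [PySem.Chars.isIn_eq_false_iff]
      intro hinf
      have := hinf.length_le; simp at this
    · by_cases hc : c = ' ' ∧ d = ' '
      · obtain ⟨h1, h2⟩ := hc; subst h1; subst h2
        rw [show pvHasDD (' ' :: ' ' :: t') = true from by simp [pvHasDD]]
        rw [PySem.Chars.isIn_iff_infix]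
        exact ⟨[], t', by simp⟩
      · rw [show pvHasDD (c :: d :: t') = pvHasDD (d :: t') from by simp [pvHasDD, hc]]
        rw [← ih]
        rcases h : PySem.Chars.isIn [' ', ' '] (d :: t') with _ | _
        · rw [PySem.Chars.isIn_eq_false_iff] at h ⊢
          intro hinf
          rw [List.infix_cons_iff] at hinf
          rcases hinf with hpre | hinf
          · rcases hpre with ⟨r, hr⟩
            simp at hr
            exact hc ⟨hr.1.symm, hr.2.1.symm⟩
          · exact h hinf
        · rw [PySem.Chars.isIn_iff_infix] at h ⊢
          exact h.trans (List.suffix_cons c (d :: t')).isInfix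

theorem pvRc_length (s : List Char) (h : pvHasDD s = true) : (pvRc s).length < s.length := by
  induction s with
  | nil => simp [pvHasDD] at h
  | cons c t ih =>
    rcases t with _ | ⟨d, t'⟩
    · simp [pvHasDD] at h
    · by_cases hc : c = ' ' ∧ d = ' '
      · obtain ⟨h1, h2⟩ := hc; subst h1; subst h2
        rw [show pvRc (' ' :: ' ' :: t') = ' ' :: pvRc t' from by simp [pvRc]]
        have := pvRc_le t'
        simp; omega
      · simp only [pvHasDD] at h
        rcases Bool.or_eq_true_iff.mp h with h' | h'
        · exact absurd (of_decide_eq_true h') hc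
        · have := ih h'
          simp only [pvRc, if_neg hc]
          simpa using Nat.succ_lt_succ this

def pvWhileCollapse (s : List Char) : List Char :=
  if _h : PySem.Chars.isIn [' ', ' '] s = true then
    pvWhileCollapse (PySem.Chars.replace s [' ', ' '] [' '])
  else s
termination_by s.length
decreasing_by
  rw [pvReplace_eq]
  exact pvRc_length s (by rw [← pvIsIn_eq]; exact _h)

def combine_transcriptions (transcriptions : List String) : String :=
  if transcriptions = [] then "" else
  let valid := (transcriptions.filter (fun t => t != "" && PySem.Str.strip t != "")).map PySem.Str.strip
  if valid = [] then "" else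
  let combined := (PySem.List.enumerate valid 0).foldl
    (fun (acc : List Char) (p : Int × String) =>
      let acc := if p.1 > 0 ∧ ¬ PySem.Chars.endswith acc [' '] ∧ ¬ PySem.Chars.startswith p.2.toList [' ']
                 then acc ++ [' '] else acc
      acc ++ p.2.toList) []
  String.ofList (PySem.Chars.strip (pvWhileCollapse combined))

-- ===== PORT B =====
def combine_transcriptions_alt (transcriptions : List String) : String :=
  let valid := (transcriptions.filter (fun t => t != "" && PySem.Str.strip t != "")).map PySem.Str.strip
  if valid = [] then "" else
  let joined := PySem.Chars.join [' '] (valid.map String.toList)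
  let out := (joined.foldl
    (fun (st : List Char × Option Char) ch =>
      (if ch = ' ' ∧ st.2 = some ' ' then st.1 else st.1 ++ [ch], some ch))
    (([] : List Char), (none : Option Char))).1
  String.ofList (PySem.Chars.strip out)

-- ===== PRECONDITION & SPEC =====
def Spec_combine_transcriptions (transcriptions : List String) (out : String) : Prop := out = combine_transcriptions_alt transcriptions
instance (transcriptions : List String) (out : String) : Decidable (Spec_combine_transcriptions transcriptions out) := by unfold Spec_combine_transcriptions; infer_instance

-- ===== CLAIM (what is proved, stated in full; the proofs are below) =====
def Claim_equal_combine_transcriptions : Prop := ∀ (transcriptions : List String), Dom_combine_transcriptions transcriptions → Spec_combine_transcriptions transcriptions (combine_transcriptions transcriptions)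

-- ===== LEMMAS AND PROOFS =====

-- B's single pass, in recursive form (b = "previous character was a space")
def pvC2 : Bool → List Char → List Char
  | _, [] => []
  | b, c :: t => if c = ' ' ∧ b = true then pvC2 (decide (c = ' ')) t
                 else c :: pvC2 (decide (c = ' ')) t

theorem pvFoldB (l : List Char) : ∀ (acc : List Char) (p : Option Char),
    (l.foldl (fun (st : List Char × Option Char) ch =>
      (if ch = ' ' ∧ st.2 = some ' ' then st.1 else st.1 ++ [ch], some ch)) (acc, p)).1
    = acc ++ pvC2 (decide (p = some ' ')) l := by
  induction l with
  | nil => intro acc p; simp [pvC2]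
  | cons c t ih =>
    intro acc p
    simp only [List.foldl_cons]
    by_cases h : c = ' ' ∧ p = some ' '
    · obtain ⟨h1, h2⟩ := h
      rw [if_pos ⟨h1, h2⟩, ih, h1, h2]
      simp [pvC2]
    · rw [if_neg h, ih]
      by_cases hc : c = ' '
      · have hp : ¬ p = some ' ' := fun hp => h ⟨hc, hp⟩
        simp [pvC2, hc, hp]
      · simp [pvC2, hc]

theorem pvHasDD_cons (c : Char) (t : List Char) (h : pvHasDD (c :: t) = false) :
    pvHasDD t = false := by
  cases t with
  | nil => rfl
  | cons d t' => simp [pvHasDD] at h; exact h.2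

theorem pvC2_id (s : List Char) : ∀ (b : Bool), pvHasDD s = false →
    (b = true → s.head? ≠ some ' ') → pvC2 b s = s := by
  induction s with
  | nil => intro b _ _; rfl
  | cons c t ih =>
    intro b hdd hb
    have hcond : ¬ (c = ' ' ∧ b = true) := by
      rintro ⟨rfl, hb'⟩
      exact hb hb' rfl
    rw [show pvC2 b (c :: t) = c :: pvC2 (decide (c = ' ')) t from by simp [pvC2, hcond]]
    congr 1
    apply ih _ (pvHasDD_cons c t hdd)
    intro hc hh
    cases t with
    | nil => simp at hh
    | cons d t' =>
      simp at hh
      simp [pvHasDD, of_decide_eq_true hc, hh] at hdd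

theorem pvC2_Rc (s : List Char) : ∀ b, pvC2 b (pvRc s) = pvC2 b s := by
  fun_induction pvRc s with
  | case1 => intro b; rfl
  | case2 c => intro b; rfl
  | case3 c d t h ih =>
    obtain ⟨rfl, rfl⟩ := h
    intro b
    cases b <;> simp [pvC2, ih]
  | case4 c d t h ih =>
    intro b
    by_cases hcb : c = ' ' ∧ b = true <;> simp [pvC2, hcb, ih]

theorem pvWhile_eq (s : List Char) : pvWhileCollapse s = pvC2 false s := by
  fun_induction pvWhileCollapse s with
  | case1 s h ih =>
    rw [ih, pvReplace_eq, pvC2_Rc]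
  | case2 s h =>
    rw [pvC2_id s false (by rw [← pvIsIn_eq]; simpa using h) (by simp)]

theorem pvDropWhile_head?_ne (l : List Char) :
    (l.dropWhile PySem.Chars.isspace).head? ≠ some ' ' := by
  intro h
  have hne : l.dropWhile PySem.Chars.isspace ≠ [] := by
    intro h0; rw [h0] at h; simp at h
  have h1 := List.head_dropWhile_not PySem.Chars.isspace hne
  rw [List.head?_eq_some_head hne] at h
  rw [Option.some_inj.mp h] at h1
  exact absurd h1 (by decide)

theorem pvStrip_last (us : List Char) : (PySem.Chars.strip us).getLast? ≠ some ' ' := by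
  simp only [PySem.Chars.strip, PySem.Chars.rstrip]
  rw [List.getLast?_reverse]
  exact pvDropWhile_head?_ne _

theorem pvStrip_head (us : List Char) : (PySem.Chars.strip us).head? ≠ some ' ' := by
  simp only [PySem.Chars.strip, PySem.Chars.rstrip, PySem.Chars.lstrip]
  have hy : (us.dropWhile PySem.Chars.isspace).head? ≠ some ' ' := pvDropWhile_head?_ne us
  set y := us.dropWhile PySem.Chars.isspace with hyd
  have hpre : ((y.reverse.dropWhile PySem.Chars.isspace).reverse : List Char) <+: y := by
    rw [← List.reverse_suffix, List.reverse_reverse]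
    exact List.dropWhile_suffix _
  intro h
  obtain ⟨r, hr⟩ := hpre
  cases hd : (y.reverse.dropWhile PySem.Chars.isspace).reverse with
  | nil => rw [hd] at h; simp at h
  | cons a z =>
    rw [hd] at h hr
    simp at h
    apply hy
    rw [← hr]
    simp [h]

theorem pvNotEndswithSpace (acc : List Char) (h : acc.getLast? ≠ some ' ') :
    PySem.Chars.endswith acc [' '] = false := by
  rcases he : PySem.Chars.endswith acc [' '] with _ | _
  · rfl
  · exfalso
    have hs : [' '] <:+ acc := by simpa [PySem.Chars.endswith] using he
    obtain ⟨r, hr⟩ := hs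
    apply h
    rw [← hr, List.getLast?_concat]

theorem pvNotStartswithSpace (l : List Char) (h : l.head? ≠ some ' ') :
    PySem.Chars.startswith l [' '] = false := by
  rcases he : PySem.Chars.startswith l [' '] with _ | _
  · rfl
  · exfalso
    have hs : [' '] <+: l := by simpa [PySem.Chars.startswith] using he
    obtain ⟨r, hr⟩ := hs
    apply h
    rw [← hr]; rfl

theorem pvLoop (vs : List String) : ∀ (acc : List Char) (k : Int), 0 < k →
    acc.getLast? ≠ some ' ' →
    (∀ t ∈ vs, t.toList.getLast? ≠ some ' ' ∧ t.toList.head? ≠ some ' ' ∧ t.toList ≠ []) →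
    (PySem.List.enumerate vs k).foldl
      (fun (acc : List Char) (p : Int × String) =>
        (if p.1 > 0 ∧ ¬ PySem.Chars.endswith acc [' '] ∧ ¬ PySem.Chars.startswith p.2.toList [' ']
         then acc ++ [' '] else acc) ++ p.2.toList) acc
    = acc ++ (vs.map (fun t => ' ' :: t.toList)).flatten := by
  induction vs with
  | nil => intro acc k _ _ _; simp [PySem.List.enumerate]
  | cons v vs ih =>
    intro acc k hk hlast hmem
    rw [PySem.List.enumerate_cons]
    simp only [List.foldl_cons]
    obtain ⟨hv1, hv2, hv3⟩ := hmem v (List.mem_cons_self ..)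
    have hcond : (k > 0 ∧ ¬ PySem.Chars.endswith acc [' '] = true
        ∧ ¬ PySem.Chars.startswith v.toList [' '] = true) := by
      refine ⟨hk, ?_, ?_⟩
      · rw [pvNotEndswithSpace acc hlast]; simp
      · rw [pvNotStartswithSpace v.toList hv2]; simp
    rw [show (if (k : Int) > 0 ∧ ¬ PySem.Chars.endswith acc [' '] = true
        ∧ ¬ PySem.Chars.startswith v.toList [' '] = true then acc ++ [' '] else acc) = acc ++ [' ']
      from if_pos hcond]
    rw [ih ((acc ++ [' ']) ++ v.toList) (k + 1) (by omega)
      (by rw [List.getLast?_append_of_ne_nil _ hv3]; exact hv1)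
      (fun t ht => hmem t (List.mem_cons_of_mem _ ht))]
    simp

theorem pvJoin_cons (a : List Char) (l : List (List Char)) :
    PySem.Chars.join [' '] (a :: l) = a ++ (l.map (fun x => ' ' :: x)).flatten := by
  show [' '].intercalate (a :: l) = _
  induction l generalizing a with
  | nil => simp [List.intercalate]
  | cons b l ih => simp_all [List.intercalate]

theorem pvToListNeNil (s : String) (h : s ≠ "") : s.toList ≠ [] := by
  intro h0
  apply h
  simpa using congrArg String.ofList h0

-- ===== VERDICT (by name: the statement is the Claim_ definition above) =====
theorem combine_transcriptions_spec : Claim_equal_combine_transcriptions := by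
  intro ts _
  unfold Spec_combine_transcriptions combine_transcriptions combine_transcriptions_alt
  by_cases hts : ts = []
  · subst hts; simp
  · rw [if_neg hts]
    by_cases hv : (ts.filter (fun t => t != "" && PySem.Str.strip t != "")).map PySem.Str.strip = []
    · rw [if_pos hv, if_pos hv]
    · rw [if_neg hv, if_neg hv]
      have hmem : ∀ t ∈ (ts.filter (fun t => t != "" && PySem.Str.strip t != "")).map PySem.Str.strip,
          t.toList.getLast? ≠ some ' ' ∧ t.toList.head? ≠ some ' ' ∧ t.toList ≠ [] := by
        intro t ht
        obtain ⟨u, hu, rfl⟩ := List.mem_map.mp ht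
        have hu' := (List.mem_filter.mp hu).2
        simp only [Bool.and_eq_true, bne_iff_ne, ne_eq] at hu'
        refine ⟨?_, ?_, ?_⟩
        · simpa using pvStrip_last u.toList
        · simpa using pvStrip_head u.toList
        · simpa using pvToListNeNil _ hu'.2
      rcases hVe : (ts.filter (fun t => t != "" && PySem.Str.strip t != "")).map PySem.Str.strip
        with _ | ⟨v, vs⟩
      · exact absurd hVe hv
      · rw [hVe] at hmem
        -- A's loop produces exactly " ".join(valid)
        have hA : (PySem.List.enumerate (v :: vs) 0).foldl
            (fun (acc : List Char) (p : Int × String) =>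
              (if p.1 > 0 ∧ ¬ PySem.Chars.endswith acc [' ']
                  ∧ ¬ PySem.Chars.startswith p.2.toList [' '] then acc ++ [' '] else acc)
              ++ p.2.toList) []
            = v.toList ++ (vs.map (fun t => ' ' :: t.toList)).flatten := by
          rw [PySem.List.enumerate_cons]
          simp only [List.foldl_cons]
          rw [show (if (0 : Int) > 0 ∧ ¬ PySem.Chars.endswith [] [' '] = true
              ∧ ¬ PySem.Chars.startswith v.toList [' '] = true
              then ([] : List Char) ++ [' '] else []) = [] from if_neg (by simp)]
          rw [pvLoop vs ([] ++ v.toList) (0 + 1) (by omega)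
            (by simpa using (hmem v (List.mem_cons_self ..)).1)
            (fun t ht => hmem t (List.mem_cons_of_mem _ ht))]
          simp
        have hB : PySem.Chars.join [' '] ((v :: vs).map String.toList)
            = v.toList ++ (vs.map (fun t => ' ' :: t.toList)).flatten := by
          rw [List.map_cons, pvJoin_cons]
          simp [List.map_map, Function.comp_def]
        dsimp only
        rw [hA]
        rw [show ∀ (l : List Char),
            (l.foldl (fun (st : List Char × Option Char) ch =>
              (if ch = ' ' ∧ st.2 = some ' ' then st.1 else st.1 ++ [ch], some ch))
              (([] : List Char), (none : Option Char))).1 = pvC2 false l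
          from fun l => by simpa using pvFoldB l [] none]
        rw [hB, pvWhile_eq]
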